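-- pv_equiv track=rewrite | github.com/PiErr0r/comp_prog | rosalind/algoritmic_heights/032_sc.py | indeg
-- ===== SOURCE A (Python) =====
-- def indeg(G, V, W):
--     ind = 0
--     for k in G.keys():
--         if k in V - W: continue
--         for c in G[k]:
--             if c in V - W:
--                 ind += 1
--     return ind
-- ===== SOURCE B (Python) =====
-- def indeg(G, V, W):
--     diff = V - W
--     into = sum(sum(1 for c in cs if c in diff) for cs in G.values())
--     within = sum(sum(1 for c in cs if c in diff) for k, cs in G.items() if k in diff)
--     return into - within
-- ===== Notes on version B (the rewrite author's own statement) =====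
-- stated objective: faster
-- what changed: Replaces A's single guarded counter (which rebuilds the set V-W for every membership test) with inclusion-exclusion: compute diff = V-W once, count all edges into diff and separately the edges within diff over G.items(), and return their difference.
import Mathlib
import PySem

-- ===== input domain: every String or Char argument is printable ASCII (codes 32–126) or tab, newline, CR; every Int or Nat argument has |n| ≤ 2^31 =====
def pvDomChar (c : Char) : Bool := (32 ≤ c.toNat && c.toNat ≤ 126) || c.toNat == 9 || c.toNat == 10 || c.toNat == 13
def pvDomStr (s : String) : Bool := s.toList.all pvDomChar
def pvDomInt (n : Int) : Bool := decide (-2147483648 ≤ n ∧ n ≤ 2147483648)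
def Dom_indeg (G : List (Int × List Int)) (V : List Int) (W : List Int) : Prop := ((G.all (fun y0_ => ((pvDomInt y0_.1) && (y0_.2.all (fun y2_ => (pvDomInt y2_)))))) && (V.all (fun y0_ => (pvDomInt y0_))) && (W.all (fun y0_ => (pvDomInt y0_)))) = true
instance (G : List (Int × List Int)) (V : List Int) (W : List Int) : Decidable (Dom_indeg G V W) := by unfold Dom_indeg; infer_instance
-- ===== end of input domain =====

-- B computes the same count by inclusion–exclusion — diff = V-W built once, then all edges into diff
-- minus edges within diff — instead of A's guarded counter that rebuilds V-W per membership test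
-- (objective: faster, measured).

-- ===== PORT A =====
def indeg (G : List (Int × List Int)) (V : List Int) (W : List Int) : Int :=
  let d := PySem.Dict.ofList G
  (PySem.Dict.keys d).foldl (fun ind k =>
    if PySem.Set.contains (PySem.Set.diff V W) k then ind
    else (PySem.Dict.getD d k []).foldl
      (fun ind c => if PySem.Set.contains (PySem.Set.diff V W) c then ind + 1 else ind) ind) 0

-- ===== PORT B =====
def indeg_alt (G : List (Int × List Int)) (V : List Int) (W : List Int) : Int :=
  let diff := PySem.Set.diff V W
  let d := PySem.Dict.ofList G
  let into := ((PySem.Dict.values d).map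
    (fun cs => (cs.map (fun c => if PySem.Set.contains diff c then (1 : Int) else 0)).sum)).sum
  let within := ((PySem.Dict.items d).map
    (fun p => if PySem.Set.contains diff p.1 then
        ((p.2.map (fun c => if PySem.Set.contains diff c then (1 : Int) else 0)).sum) else 0)).sum
  into - within

-- ===== PRECONDITION & SPEC =====
def Spec_indeg (G : List (Int × List Int)) (V : List Int) (W : List Int) (out : Int) : Prop := out = indeg_alt G V W
instance (G : List (Int × List Int)) (V : List Int) (W : List Int) (out : Int) : Decidable (Spec_indeg G V W out) := by unfold Spec_indeg; infer_instance

-- ===== CLAIM (what is proved, stated in full; the proofs are below) =====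
def Claim_equal_indeg : Prop := ∀ (G : List (Int × List Int)) (V : List Int) (W : List Int), Dom_indeg G V W → Spec_indeg G V W (indeg G V W)

-- ===== LEMMAS AND PROOFS =====

-- the inner counting loop of A is the sum B computes per adjacency list
theorem pv_inner (P : Int → Bool) (cs : List Int) (acc : Int) :
    cs.foldl (fun ind c => if P c then ind + 1 else ind) acc
      = acc + (cs.map (fun c => if P c then (1 : Int) else 0)).sum := by
  induction cs generalizing acc with
  | nil => simp
  | cons c cs ih =>
    simp only [List.foldl_cons, List.map_cons, List.sum_cons, ih]
    split <;> ring

-- A's guarded outer loop as a sum over the keys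
theorem pv_outer (P : Int → Bool) (g : Int → List Int) (ks : List Int) (acc : Int) :
    ks.foldl (fun ind k =>
      if P k then ind
      else (g k).foldl (fun ind c => if P c then ind + 1 else ind) ind) acc
      = acc + (ks.map (fun k => if P k then (0 : Int)
          else ((g k).map (fun c => if P c then (1 : Int) else 0)).sum)).sum := by
  induction ks generalizing acc with
  | nil => simp
  | cons k ks ih =>
    simp only [List.foldl_cons, List.map_cons, List.sum_cons, ih]
    by_cases h : P k = true
    · simp only [if_pos h]; ring
    · simp only [if_neg h, pv_inner]; ring

theorem pv_sum_sub (l : List Int) (f g : Int → Int) :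
    (l.map f).sum - (l.map g).sum = (l.map (fun k => f k - g k)).sum := by
  induction l with
  | nil => simp
  | cons x l ih => simp only [List.map_cons, List.sum_cons]; omega

-- ===== VERDICT (by name: the statement is the Claim_ definition above) =====
theorem indeg_spec : Claim_equal_indeg := by
  intro G V W _
  unfold Spec_indeg indeg indeg_alt
  dsimp only
  rw [pv_outer (fun x => PySem.Set.contains (PySem.Set.diff V W) x)
        (fun k => PySem.Dict.getD (PySem.Dict.ofList G) k []), zero_add]
  rw [show (PySem.Dict.ofList G).values = ((PySem.Dict.ofList G).items).map (·.2) from rfl,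
      PySem.Dict.items_eq_map_keys _ (PySem.Dict.nodup_keys_ofList G) []]
  simp only [List.map_map, Function.comp_def]
  rw [pv_sum_sub]
  congr 1
  apply List.map_congr_left
  intro k _
  by_cases h : k ∈ V ∧ k ∉ W <;> simp [h]
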